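-- pv_equiv track=rewrite | github.com/Pirate-Hunter-Zoro/Bayesian-Network | calculations_helper.py | find_corresponding_rows
-- ===== SOURCE A (Python) =====
-- def find_corresponding_rows(bit_mask: list[int], common_vars: list[int], all_vars: list[int]) -> list[int]:
--     """Given a list of common variables and which ones are set to true, find the rows in the distribution array that would correspond to all_vars which share the same truth value
--
--     Args:
--         bit_mask (list[int]): truth values for each of the common variables
--         common_vars (list[int]): list of common variables
--         all_vars (list[int]): list of all variables (common variables will be a subset)
--
--     Returns:
--         list[int]: list of rows corresponding with the truth values associated with the common variables
--     """
--     if len(common_vars) == 0: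
--         # then return all rows
--         return [i for i in range(1 << len(all_vars))]
--     else:
--         vars_to_posn = {v : all_vars.index(v) for v in common_vars}
--         common_rows = set()
--         # we will have a list of sets which we will take the intersection of
--         row_sets = [set() for _ in common_vars]
--         for i, v in enumerate(common_vars):
--             idx = vars_to_posn[v]
--             binary_posn = len(all_vars) - 1 - idx
--             switch_every = 2 ** binary_posn
--             # see if at this row, the given common variable's truth value is matched
--             for row in range(2**len(all_vars)):
--                 negative_row = ((row // switch_every) % 2) == 0
--                 if not bit_mask[i] and negative_row:
--                     row_sets[i].add(row)
--                 elif bit_mask[i] and not negative_row: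
--                     row_sets[i].add(row)
--         # now take the intersection of all the row sets
--         for row in row_sets[0]:
--             missing = False
--             for i in range(1, len(row_sets)):
--                 if row not in row_sets[i]:
--                     missing = True
--                     break
--             if not missing:
--                 common_rows.add(row)
--
--         result = list(common_rows)
--         result.sort()
--         return result
-- ===== SOURCE B (Python) =====
-- def find_corresponding_rows(bit_mask: list[int], common_vars: list[int], all_vars: list[int]) -> list[int]:
--     """Resolve each common variable to a (bit-position, truth-value) constraint once,
--     then directly emit the matching rows in increasing order by recursing over the
--     bit positions from most to least significant (constrained bits are fixed, free
--     bits branch)."""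
--     n = len(all_vars)
--     pos_of = {}
--     for j, v in enumerate(all_vars):
--         if v not in pos_of:
--             pos_of[v] = j
--     constraint = {}
--     for i, v in enumerate(common_vars):
--         p = pos_of[v]
--         b = 1 if bit_mask[i] else 0
--         if p in constraint and constraint[p] != b:
--             return []
--         constraint[p] = b
--
--     def emit(p, base):
--         if p == n:
--             return [base]
--         w = 1 << (n - 1 - p)
--         if p in constraint:
--             return emit(p + 1, base + (w if constraint[p] else 0))
--         return emit(p + 1, base) + emit(p + 1, base + w)
--
--     return emit(0, 0)
-- ===== Notes on version B (the rewrite author's own statement) =====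
-- stated objective: alternative
-- what changed: Instead of building one 2^n-row set per common variable and intersecting them, B resolves each common variable to a (bit-position, truth-value) constraint once (returning [] on conflicting duplicates) and directly emits only the matching rows in increasing order by recursing over bit positions; intended as faster (O(n+k+2^(n-k)) work vs A's O(k*2^n), measured 17.6x at n=16), but both are exponential at the largest timed size, so no speed claim is made.
import Mathlib
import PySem

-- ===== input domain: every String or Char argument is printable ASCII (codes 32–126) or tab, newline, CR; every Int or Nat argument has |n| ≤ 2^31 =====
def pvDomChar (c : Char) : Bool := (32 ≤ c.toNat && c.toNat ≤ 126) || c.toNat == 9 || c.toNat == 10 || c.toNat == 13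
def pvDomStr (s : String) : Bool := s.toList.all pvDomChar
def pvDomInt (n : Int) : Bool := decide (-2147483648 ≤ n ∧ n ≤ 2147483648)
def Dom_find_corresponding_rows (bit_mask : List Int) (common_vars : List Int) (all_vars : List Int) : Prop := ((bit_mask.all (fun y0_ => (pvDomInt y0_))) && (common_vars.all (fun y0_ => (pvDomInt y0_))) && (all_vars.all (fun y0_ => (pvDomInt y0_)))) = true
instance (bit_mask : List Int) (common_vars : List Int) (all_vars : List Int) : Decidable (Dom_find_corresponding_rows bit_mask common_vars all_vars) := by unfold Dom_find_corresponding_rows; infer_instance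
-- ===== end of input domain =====

-- B replaces A's per-variable 2^n-row sets and their intersection by resolving each common
-- variable to one (bit-position, truth-value) constraint and directly emitting only the
-- matching rows in increasing order (objective: alternative algorithm; it does less work
-- per emitted row, though both remain exponential in the number of variables).
-- Equivalence is about the RETURN value; neither program mutates its arguments.

-- ===== PORT A =====
-- inner intersection loop 'for i in range(1, len(row_sets)): if row not in row_sets[i]: missing=True; break'
def pvMissingLoop (row_sets : List (PySem.Set Int)) (row : Int) : List Int → Bool
  | [] => false
  | i :: rest =>
    if !(PySem.List.pyGetD row_sets i PySem.Set.empty).contains row then true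
    else pvMissingLoop row_sets row rest

def find_corresponding_rows (bit_mask : List Int) (common_vars : List Int) (all_vars : List Int) : List Int :=
  if common_vars.length = 0 then
    PySem.List.pyRange 0 ((1 : Int) <<< all_vars.length) 1
  else
    -- all_vars.index(v) raises ValueError when v ∉ all_vars: excluded by Pre_, the .getD 0 default never fires there
    let vars_to_posn : PySem.Dict Int Int :=
      common_vars.foldl (fun d v => d.insert v (((PySem.List.index? all_vars v).getD 0 : Nat) : Int)) PySem.Dict.empty
    let row_sets : List (PySem.Set Int) :=
      (PySem.List.enumerate common_vars 0).map (fun iv =>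
        let idx := vars_to_posn.getD iv.2 0
        let binary_posn := (all_vars.length : Int) - 1 - idx
        let switch_every := (2 : Int) ^ binary_posn.toNat
        (PySem.List.pyRange 0 ((2 : Int) ^ all_vars.length) 1).foldl (fun s row =>
          let negative_row := PySem.Int.mod (PySem.Int.floordiv row switch_every) 2 == 0
          if (PySem.List.pyGetD bit_mask iv.1 0 == 0) && negative_row then PySem.Set.add s row
          else if !(PySem.List.pyGetD bit_mask iv.1 0 == 0) && !negative_row then PySem.Set.add s row
          else s) PySem.Set.empty)
    let common_rows : PySem.Set Int :=
      (PySem.List.pyGetD row_sets 0 PySem.Set.empty).foldl (fun cr row =>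
        if pvMissingLoop row_sets row (PySem.List.pyRange 1 (row_sets.length : Int) 1) then cr
        else PySem.Set.add cr row) PySem.Set.empty
    PySem.List.sorted common_rows (fun x => x)

-- ===== PORT B =====
-- the constraint-building loop; pos_of[v] raises KeyError when v ∉ all_vars: excluded by Pre_, .getD 0 never fires there
def pvAltBuild (bit_mask : List Int) (pos_of : PySem.Dict Int Int) :
    List (Int × Int) → PySem.Dict Int Int → Option (PySem.Dict Int Int)
  | [], C => some C
  | iv :: rest, C =>
    let p := pos_of.getD iv.2 0
    let b : Int := if PySem.List.pyGetD bit_mask iv.1 0 ≠ 0 then 1 else 0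
    if C.contains p ∧ C.getD p 0 ≠ b then none
    else pvAltBuild bit_mask pos_of rest (C.insert p b)

-- emit(p, base), recursing on the remaining positions fuel = n - p (so n-1-p = fuel-1)
def pvAltEmit (C : PySem.Dict Int Int) (n : Nat) : Nat → Int → List Int
  | 0, base => [base]
  | fuel+1, base =>
    let p : Int := (n : Int) - ((fuel : Int) + 1)
    let w : Int := (1 : Int) <<< fuel
    if C.contains p then
      pvAltEmit C n fuel (base + (if C.getD p 0 ≠ 0 then w else 0))
    else
      pvAltEmit C n fuel base ++ pvAltEmit C n fuel (base + w)

def find_corresponding_rows_alt (bit_mask : List Int) (common_vars : List Int) (all_vars : List Int) : List Int :=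
  let pos_of : PySem.Dict Int Int :=
    (PySem.List.enumerate all_vars 0).foldl
      (fun d jv => if d.contains jv.2 then d else d.insert jv.2 jv.1) PySem.Dict.empty
  match pvAltBuild bit_mask pos_of (PySem.List.enumerate common_vars 0) PySem.Dict.empty with
  | none => []
  | some C => pvAltEmit C all_vars.length all_vars.length 0

-- ===== PRECONDITION & SPEC =====
-- Pre_ is exactly A's non-raising domain: A raises ValueError when some common variable is
-- missing from all_vars, and IndexError when bit_mask is shorter than common_vars.
def Pre_find_corresponding_rows (bit_mask : List Int) (common_vars : List Int) (all_vars : List Int) : Prop :=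
  common_vars.length ≤ bit_mask.length ∧ ∀ v ∈ common_vars, v ∈ all_vars
instance (bit_mask : List Int) (common_vars : List Int) (all_vars : List Int) : Decidable (Pre_find_corresponding_rows bit_mask common_vars all_vars) := by unfold Pre_find_corresponding_rows; infer_instance

def pvWitness_find_corresponding_rows : List Int × List Int × List Int := ([1, 0], [5, 7], [5, 6, 7])

def Spec_find_corresponding_rows (bit_mask : List Int) (common_vars : List Int) (all_vars : List Int) (out : List Int) : Prop := out = find_corresponding_rows_alt bit_mask common_vars all_vars
instance (bit_mask : List Int) (common_vars : List Int) (all_vars : List Int) (out : List Int) : Decidable (Spec_find_corresponding_rows bit_mask common_vars all_vars out) := by unfold Spec_find_corresponding_rows; infer_instance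

-- ===== CLAIM (what is proved, stated in full; the proofs are below) =====
def Claim_equal_find_corresponding_rows : Prop := ∀ (bit_mask : List Int) (common_vars : List Int) (all_vars : List Int), Dom_find_corresponding_rows bit_mask common_vars all_vars → Pre_find_corresponding_rows bit_mask common_vars all_vars → Spec_find_corresponding_rows bit_mask common_vars all_vars (find_corresponding_rows bit_mask common_vars all_vars)

-- ===== LEMMAS AND PROOFS =====

-- one bit constraint on a natural row, in row-width n
def pvPairOk (n : Nat) (p b : Int) (r : Nat) : Prop := r / 2 ^ (n - 1 - p.toNat) % 2 = b.toNat

-- all constraints recorded in the dict hold on row r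
def pvMatches (n : Nat) (C : PySem.Dict Int Int) (r : Nat) : Prop :=
  ∀ p b, C.get? p = some b → pvPairOk n p b r

-- the constraint contributed by one enumerate step of B's build loop
def pvStep (bm : List Int) (pos : PySem.Dict Int Int) (n : Nat) (iv : Int × Int) (r : Nat) : Prop :=
  pvPairOk n (pos.getD iv.2 0) (if PySem.List.pyGetD bm iv.1 0 ≠ 0 then 1 else 0) r

-- constraints at positions p ≥ n - fuel (weights < 2^fuel) hold on r
def pvLowOk (n fuel : Nat) (C : PySem.Dict Int Int) (r : Nat) : Bool :=
  C.items.all (fun pb => !(decide ((n : Int) - fuel ≤ pb.1)) || decide (r / 2 ^ (n - 1 - pb.1.toNat) % 2 = pb.2.toNat))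


lemma pvLowOk_iff (n fuel : Nat) (C : PySem.Dict Int Int) (r : Nat) (hnd : C.keys.Nodup) :
    pvLowOk n fuel C r = true ↔
      ∀ p b, C.get? p = some b → (n : Int) - fuel ≤ p → pvPairOk n p b r := by
  rw [pvLowOk, List.all_eq_true]
  constructor
  · intro h p b hpb hle
    have := h (p, b) (PySem.Dict.mem_items_of_get?_eq_some C hpb)
    simp only [Bool.or_eq_true, Bool.not_eq_true', decide_eq_false_iff_not, decide_eq_true_eq] at this
    rcases this with hno | hok
    · exact absurd hle hno
    · exact hok
  · intro h pb hmem
    have hget := PySem.Dict.get?_of_mem_items C hmem hnd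
    simp only [Bool.or_eq_true, Bool.not_eq_true', decide_eq_false_iff_not, decide_eq_true_eq]
    by_cases hle : (n : Int) - fuel ≤ pb.1
    · exact Or.inr (h pb.1 pb.2 hget hle)
    · exact Or.inl hle

lemma pvSetFoldFilter (l : List Int) (p : Int → Bool) (s : PySem.Set Int)
    (hl : l.Nodup) (hs : ∀ x ∈ l, x ∉ s) :
    l.foldl (fun s x => if p x then PySem.Set.add s x else s) s = s ++ l.filter p := by
  induction l generalizing s with
  | nil => simp
  | cons x t ih =>
    have hnd := List.nodup_cons.mp hl
    have hx : x ∉ s := hs x (by simp)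
    have hadd : PySem.Set.add s x = s ++ [x] := by
      simp [PySem.Set.add, PySem.Set.contains, List.contains_eq_mem, hx]
    cases hp : p x with
    | true =>
      simp only [List.foldl_cons, hp, if_true, hadd]
      rw [ih (s ++ [x]) hnd.2 (by
        intro y hy hmem
        simp only [List.mem_append, List.mem_singleton] at hmem
        rcases hmem with h | rfl
        · exact hs y (by simp [hy]) h
        · exact hnd.1 hy)]
      simp [hp, List.append_assoc]
    | false =>
      simp only [List.foldl_cons, hp, Bool.false_eq_true, if_false]
      rw [ih s hnd.2 (fun y hy => hs y (by simp [hy]))]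
      simp [hp]

lemma pvMissingLoop_eq_any (rs : List (PySem.Set Int)) (row : Int) (l : List Int) :
    pvMissingLoop rs row l = l.any (fun i => !(PySem.List.pyGetD rs i PySem.Set.empty).contains row) := by
  induction l with
  | nil => rfl
  | cons i rest ih =>
    simp only [pvMissingLoop, List.any_cons, ← ih]
    cases h : (PySem.List.pyGetD rs i PySem.Set.empty).contains row <;> simp

lemma pvDictFoldFunGetD (l : List Int) (f : Int → Int) (d : PySem.Dict Int Int) (v : Int) :
    (l.foldl (fun d x => d.insert x (f x)) d).getD v 0 = if v ∈ l then f v else d.getD v 0 := by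
  induction l generalizing d with
  | nil => simp
  | cons x t ih =>
    simp only [List.foldl_cons, ih, List.mem_cons]
    by_cases hvt : v ∈ t
    · simp [hvt]
    · by_cases hvx : v = x
      · simp [hvt, hvx, PySem.Dict.getD_insert]
      · simp [hvt, hvx, PySem.Dict.getD_insert]

lemma pvIndexGetD (l : List Int) (v : Int) (h : v ∈ l) :
    (PySem.List.index? l v).getD 0 = l.idxOf v := by
  induction l with
  | nil => cases h
  | cons x t ih =>
    by_cases hvx : x = v
    · subst hvx
      rw [PySem.List.index?_cons_self]
      simp
    · rw [PySem.List.index?_cons_of_ne _ hvx]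
      have hvt : v ∈ t := by rcases List.mem_cons.mp h with rfl | ht; exact absurd rfl hvx; exact ht
      obtain ⟨m, hm⟩ := Option.isSome_iff_exists.mp ((PySem.List.index?_isSome_iff t v).mpr hvt)
      rw [hm]
      have hmi := ih hvt
      rw [hm] at hmi
      simp only [Option.getD_some, Option.map_some] at hmi ⊢
      simp [List.idxOf_cons, show (x == v) = false by simp [hvx], hmi]

lemma pvPosFoldGetD (l : List Int) (s : Int) (d : PySem.Dict Int Int) (v : Int) :
    ((PySem.List.enumerate l s).foldl (fun d jv => if d.contains jv.2 then d else d.insert jv.2 jv.1) d).getD v 0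
      = if d.contains v then d.getD v 0 else if v ∈ l then s + (l.idxOf v : Int) else 0 := by
  induction l generalizing s d with
  | nil =>
    simp only [PySem.List.enumerate, List.foldl_nil, List.not_mem_nil, if_false]
    by_cases hcv : d.contains v = true
    · simp [hcv]
    · simp [hcv, PySem.Dict.getD_of_not_contains _ _ (by simpa using hcv)]
  | cons x t ih =>
    rw [PySem.List.enumerate_cons, List.foldl_cons]
    by_cases hcx : d.contains x = true
    · have hstep : (if d.contains x = true then d else d.insert x s) = d := by simp [hcx]
      rw [hstep, ih]
      by_cases hcv : d.contains v = true
      · simp [hcv]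
      · have hvx : v ≠ x := by rintro rfl; exact hcv hcx
        simp only [hcv, if_false, List.mem_cons, hvx, false_or, Bool.false_eq_true]
        by_cases hvt : v ∈ t
        · simp only [hvt, if_true, List.idxOf_cons,
            show (x == v) = false by simp [Ne.symm hvx], cond_false]
          push_cast; ring
        · simp [hvt]
    · have hstep : (if d.contains x = true then d else d.insert x s) = d.insert x s := by simp [hcx]
      rw [hstep, ih]
      by_cases hvx : v = x
      · subst hvx
        simp [PySem.Dict.contains_insert, PySem.Dict.getD_insert, List.idxOf_cons, hcx]
      · have hc' : (d.insert x s).contains v = d.contains v := by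
          simp [PySem.Dict.contains_insert, show (v == x) = false by simp [hvx]]
        have hg' : (d.insert x s).getD v 0 = d.getD v 0 := by
          rw [PySem.Dict.getD_insert]; simp [hvx]
        rw [hc', hg']
        by_cases hcv : d.contains v = true
        · simp [hcv]
        · simp only [hcv, if_false, List.mem_cons, hvx, false_or, Bool.false_eq_true]
          by_cases hvt : v ∈ t
          · simp only [hvt, if_true, List.idxOf_cons,
              show (x == v) = false by simp [Ne.symm hvx], cond_false]
            push_cast; ring
          · simp [hvt]

lemma pvMatchesInsert (n : Nat) (C : PySem.Dict Int Int) (p b : Int) (r : Nat)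
    (hcond : C.contains p = false ∨ C.getD p 0 = b) :
    pvMatches n (C.insert p b) r ↔ pvMatches n C r ∧ pvPairOk n p b r := by
  constructor
  · intro h
    refine ⟨?_, h p b (by rw [PySem.Dict.get?_insert]; simp)⟩
    intro q b' hq
    by_cases hqp : q = p
    · subst hqp
      rcases hcond with hc | hc
      · rw [(PySem.Dict.get?_eq_none_iff_contains C q).mpr hc] at hq; cases hq
      · have hb : b' = b := ((PySem.Dict.getD_of_get?_eq_some C (0 : Int) hq).symm.trans hc)
        subst hb
        exact h q b' (by rw [PySem.Dict.get?_insert]; simp)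
    · exact h q b' (by rw [PySem.Dict.get?_insert, if_neg hqp]; exact hq)
  · rintro ⟨hm, hp⟩ q b' hq
    rw [PySem.Dict.get?_insert] at hq
    by_cases hqp : q = p
    · subst hqp; rw [if_pos rfl] at hq; cases hq; exact hp
    · rw [if_neg hqp] at hq; exact hm q b' hq


lemma pvBuildSome (bm : List Int) (pos : PySem.Dict Int Int) (n : Nat) :
    ∀ (l : List (Int × Int)) (C C' : PySem.Dict Int Int),
      pvAltBuild bm pos l C = some C' → ∀ r,
      (pvMatches n C' r ↔ (pvMatches n C r ∧ ∀ iv ∈ l, pvStep bm pos n iv r)) := by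
  intro l
  induction l with
  | nil =>
    intro C C' h r
    simp only [pvAltBuild] at h
    cases h; simp
  | cons iv rest ih =>
    intro C C' h r
    simp only [pvAltBuild] at h
    by_cases hcon : C.contains (pos.getD iv.2 0) = true ∧
        C.getD (pos.getD iv.2 0) 0 ≠ (if PySem.List.pyGetD bm iv.1 0 ≠ 0 then 1 else 0 : Int)
    · rw [if_pos hcon] at h; cases h
    · rw [if_neg hcon] at h
      have hc2 : C.contains (pos.getD iv.2 0) = false ∨
          C.getD (pos.getD iv.2 0) 0 = (if PySem.List.pyGetD bm iv.1 0 ≠ 0 then 1 else 0 : Int) := by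
        by_cases hc : C.contains (pos.getD iv.2 0) = true
        · right; by_contra hne; exact hcon ⟨hc, hne⟩
        · left; simpa using hc
      rw [ih _ _ h r, pvMatchesInsert n C _ _ r hc2]
      constructor
      · rintro ⟨⟨hm, hp⟩, hrest⟩
        refine ⟨hm, ?_⟩
        intro jv hjv
        rcases List.mem_cons.mp hjv with rfl | hjv
        · exact hp
        · exact hrest jv hjv
      · rintro ⟨hm, hall⟩
        exact ⟨⟨hm, hall iv (by simp)⟩, fun jv hjv => hall jv (by simp [hjv])⟩

lemma pvBuildNone (bm : List Int) (pos : PySem.Dict Int Int) (n : Nat) :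
    ∀ (l : List (Int × Int)) (C : PySem.Dict Int Int),
      (∀ p b, C.get? p = some b → b = 0 ∨ b = 1) →
      pvAltBuild bm pos l C = none → ∀ r,
      ¬ (pvMatches n C r ∧ ∀ iv ∈ l, pvStep bm pos n iv r) := by
  intro l
  induction l with
  | nil => intro C _ h; simp [pvAltBuild] at h
  | cons iv rest ih =>
    intro C hv h r
    simp only [pvAltBuild] at h
    by_cases hcon : C.contains (pos.getD iv.2 0) = true ∧
        C.getD (pos.getD iv.2 0) 0 ≠ (if PySem.List.pyGetD bm iv.1 0 ≠ 0 then 1 else 0 : Int)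
    · obtain ⟨hc, hne⟩ := hcon
      rintro ⟨hm, hall⟩
      have hsome : ∃ b', C.get? (pos.getD iv.2 0) = some b' := by
        rw [PySem.Dict.contains_eq_isSome_get?] at hc
        exact Option.isSome_iff_exists.mp hc
      obtain ⟨b', hb'⟩ := hsome
      have hgd := PySem.Dict.getD_of_get?_eq_some C (0 : Int) hb'
      have hb'v := hv _ _ hb'
      have h1 : pvPairOk n (pos.getD iv.2 0) b' r := hm _ _ hb'
      have h2 : pvPairOk n (pos.getD iv.2 0) (if PySem.List.pyGetD bm iv.1 0 ≠ 0 then 1 else 0) r :=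
        hall iv (by simp)
      unfold pvPairOk at h1 h2
      rw [hgd] at hne
      rcases hb'v with rfl | rfl <;> split at h2 <;> split at hne <;> simp_all
    · rw [if_neg hcon] at h
      have hc2 : C.contains (pos.getD iv.2 0) = false ∨
          C.getD (pos.getD iv.2 0) 0 = (if PySem.List.pyGetD bm iv.1 0 ≠ 0 then 1 else 0 : Int) := by
        by_cases hc : C.contains (pos.getD iv.2 0) = true
        · right; by_contra hne; exact hcon ⟨hc, hne⟩
        · left; simpa using hc
      have hv' : ∀ p b, (C.insert (pos.getD iv.2 0) (if PySem.List.pyGetD bm iv.1 0 ≠ 0 then 1 else 0 : Int)).get? p = some b → b = 0 ∨ b = 1 := by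
        intro p b hb
        rw [PySem.Dict.get?_insert] at hb
        split at hb
        · cases hb; split <;> simp
        · exact hv _ _ hb
      have hih := ih _ hv' h r
      rintro ⟨hm, hall⟩
      exact hih ⟨(pvMatchesInsert n C _ _ r hc2).mpr ⟨hm, hall iv (by simp)⟩,
        fun jv hjv => hall jv (by simp [hjv])⟩

lemma pvBuildProps (bm : List Int) (pos : PySem.Dict Int Int) (Q : Int → Int → Prop) :
    ∀ (l : List (Int × Int)) (C C' : PySem.Dict Int Int),
      pvAltBuild bm pos l C = some C' →
      (∀ p b, C.get? p = some b → Q p b) →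
      (∀ iv ∈ l, Q (pos.getD iv.2 0) 0 ∧ Q (pos.getD iv.2 0) 1) →
      ∀ p b, C'.get? p = some b → Q p b := by
  intro l
  induction l with
  | nil => intro C C' h hC _; simp only [pvAltBuild] at h; cases h; exact hC
  | cons iv rest ih =>
    intro C C' h hC hl
    simp only [pvAltBuild] at h
    by_cases hcon : C.contains (pos.getD iv.2 0) = true ∧
        C.getD (pos.getD iv.2 0) 0 ≠ (if PySem.List.pyGetD bm iv.1 0 ≠ 0 then 1 else 0 : Int)
    · rw [if_pos hcon] at h; cases h
    · rw [if_neg hcon] at h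
      refine ih _ _ h ?_ (fun jv hjv => hl jv (by simp [hjv]))
      intro p b hb
      rw [PySem.Dict.get?_insert] at hb
      split at hb
      · rename_i hpq
        cases hb
        have hQiv := hl iv (by simp)
        subst hpq
        split <;> [exact hQiv.2; exact hQiv.1]
      · exact hC _ _ hb

lemma pvBuildNodup (bm : List Int) (pos : PySem.Dict Int Int) :
    ∀ (l : List (Int × Int)) (C C' : PySem.Dict Int Int),
      pvAltBuild bm pos l C = some C' → C.keys.Nodup → C'.keys.Nodup := by
  intro l
  induction l with
  | nil => intro C C' h hC; simp only [pvAltBuild] at h; cases h; exact hC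
  | cons iv rest ih =>
    intro C C' h hC
    simp only [pvAltBuild] at h
    by_cases hcon : C.contains (pos.getD iv.2 0) = true ∧
        C.getD (pos.getD iv.2 0) 0 ≠ (if PySem.List.pyGetD bm iv.1 0 ≠ 0 then 1 else 0 : Int)
    · rw [if_pos hcon] at h; cases h
    · rw [if_neg hcon] at h
      exact ih _ _ h (PySem.Dict.nodup_keys_insert _ _ _ hC)

lemma pvShiftInt (fuel : Nat) : ((1 : Int) <<< fuel) = ((2 ^ fuel : Nat) : Int) := by
  rw [Int.shiftLeft_eq]; push_cast; ring

lemma pvBitLow (e fuel r : Nat) (he : e < fuel) : (2 ^ fuel + r) / 2 ^ e % 2 = r / 2 ^ e % 2 := by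
  have h : 2 ^ fuel + r = r + (2 ^ (fuel - e - 1) * 2) * 2 ^ e := by
    have : (2 ^ (fuel - e - 1) * 2) * 2 ^ e = 2 ^ fuel := by
      rw [mul_assoc, ← pow_succ', ← pow_add]; congr 1; omega
    omega
  rw [h, Nat.add_mul_div_right _ _ (Nat.two_pow_pos e), Nat.add_mul_mod_self_right]

lemma pvBitHigh (fuel r : Nat) (hr : r < 2 ^ fuel) : (2 ^ fuel + r) / 2 ^ fuel % 2 = 1 := by
  have h : (2 ^ fuel + r) / 2 ^ fuel = 1 + r / 2 ^ fuel := by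
    rw [add_comm, Nat.add_div_right _ (Nat.two_pow_pos fuel), add_comm]
  rw [h, Nat.div_eq_of_lt hr]

lemma pvBitZero (fuel r : Nat) (hr : r < 2 ^ fuel) : r / 2 ^ fuel % 2 = 0 := by
  rw [Nat.div_eq_of_lt hr]

lemma pvEmitEq (C : PySem.Dict Int Int) (n : Nat) (hnd : C.keys.Nodup)
    (hQ : ∀ p b, C.get? p = some b → 0 ≤ p ∧ p < (n : Int) ∧ (b = 0 ∨ b = 1)) :
    ∀ fuel, fuel ≤ n → ∀ base,
      pvAltEmit C n fuel base
        = ((List.range (2 ^ fuel)).filter (fun r => pvLowOk n fuel C r)).map (fun r : Nat => base + (r : Int)) := by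
  intro fuel
  induction fuel with
  | zero =>
    intro _ base
    have h0 : pvLowOk n 0 C 0 = true := by
      rw [pvLowOk_iff n 0 C 0 hnd]
      intro p b hpb hle
      rcases hQ p b hpb with ⟨_, hlt, _⟩
      omega
    simp [pvAltEmit, List.range_one, h0]
  | succ fuel ih =>
    intro hle base
    have hexp : ∀ q : Int, C.get? q = some q → True := fun _ _ => trivial
    have hp0 : ((n : Int) - ((fuel : Int) + 1)).toNat = n - fuel - 1 := by omega
    have hfe : n - 1 - ((n : Int) - ((fuel : Int) + 1)).toNat = fuel := by omega
    -- exponent of any other applicable constraint is < fuel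
    have hlowexp : ∀ q b, C.get? q = some b → (n : Int) - fuel ≤ q → n - 1 - q.toNat < fuel := by
      intro q b hq hge
      rcases hQ q b hq with ⟨hq0, hqn, _⟩
      omega
    have hrange : List.range (2 ^ (fuel + 1)) = List.range (2 ^ fuel) ++ (List.range (2 ^ fuel)).map (fun x => 2 ^ fuel + x) := by
      rw [← List.range_add]; congr 1; rw [pow_succ]; ring
    -- transfer of pvLowOk across adding the high bit
    have htrans : ∀ r, r < 2 ^ fuel → pvLowOk n fuel C (2 ^ fuel + r) = pvLowOk n fuel C r := by
      intro r hr
      rw [Bool.eq_iff_iff, pvLowOk_iff n fuel C _ hnd, pvLowOk_iff n fuel C _ hnd]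
      constructor <;> intro h q b hq hge <;> have hbit := pvBitLow _ _ r (hlowexp q b hq hge)
      · have := h q b hq hge; unfold pvPairOk at *; rw [hbit] at this; exact this
      · have := h q b hq hge; unfold pvPairOk at *; rw [hbit]; exact this
    by_cases hcon : C.contains ((n : Int) - ((fuel : Int) + 1)) = true
    · have hsome := Option.isSome_iff_exists.mp ((PySem.Dict.contains_eq_isSome_get? C _) ▸ hcon)
      obtain ⟨b, hb⟩ := hsome
      have hgd := PySem.Dict.getD_of_get?_eq_some C (0 : Int) hb
      rcases (hQ _ _ hb).2.2 with rfl | rfl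
      · -- b = 0 : constrained bit must be 0, only low half survives
        have hlow : ∀ r ∈ List.range (2 ^ fuel), pvLowOk n (fuel + 1) C r = pvLowOk n fuel C r := by
          intro r hr
          rw [List.mem_range] at hr
          rw [Bool.eq_iff_iff, pvLowOk_iff n (fuel+1) C r hnd, pvLowOk_iff n fuel C r hnd]
          constructor
          · intro h q b hq hge; exact h q b hq (by omega)
          · intro h q b hq hge
            by_cases hqp : q = (n : Int) - ((fuel : Int) + 1)
            · subst hqp
              have : b = 0 := by
                have := PySem.Dict.getD_of_get?_eq_some C (0 : Int) hq
                omega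
              subst this
              unfold pvPairOk; rw [hfe, pvBitZero fuel r hr]; rfl
            · exact h q b hq (by
                rcases hQ q b hq with ⟨hq0, hqn, _⟩; omega)
        have hhigh : (List.range (2 ^ fuel)).filter (fun r => pvLowOk n (fuel+1) C (2 ^ fuel + r)) = [] := by
          rw [List.filter_eq_nil_iff]
          intro r hr
          rw [List.mem_range] at hr
          intro hcontra
          rw [pvLowOk_iff n (fuel+1) C _ hnd] at hcontra
          have := hcontra _ _ hb (by omega)
          unfold pvPairOk at this
          rw [hfe, pvBitHigh fuel r hr] at this
          simp at this
        simp only [pvAltEmit, hcon, if_true, hgd]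
        rw [if_neg (by simp), ih (by omega)]
        rw [hrange, List.filter_append, List.filter_map, List.map_append, List.map_map]
        rw [List.filter_congr hlow]
        have : (List.filter ((fun r => pvLowOk n (fuel+1) C r) ∘ fun x => 2 ^ fuel + x) (List.range (2 ^ fuel))) = [] := hhigh
        rw [this]
        simp
      · -- b = 1 : only high half survives
        have hlow : (List.range (2 ^ fuel)).filter (fun r => pvLowOk n (fuel+1) C r) = [] := by
          rw [List.filter_eq_nil_iff]
          intro r hr
          rw [List.mem_range] at hr
          intro hcontra
          rw [pvLowOk_iff n (fuel+1) C _ hnd] at hcontra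
          have := hcontra _ _ hb (by omega)
          unfold pvPairOk at this
          rw [hfe, pvBitZero fuel r hr] at this
          simp at this
        have hhigh : ∀ r ∈ List.range (2 ^ fuel), pvLowOk n (fuel+1) C (2 ^ fuel + r) = pvLowOk n fuel C r := by
          intro r hr
          rw [List.mem_range] at hr
          rw [Bool.eq_iff_iff, pvLowOk_iff n (fuel+1) C _ hnd, pvLowOk_iff n fuel C r hnd]
          constructor
          · intro h q b hq hge
            have := h q b hq (by omega)
            unfold pvPairOk at *
            rw [pvBitLow _ _ r (hlowexp q b hq hge)] at this
            exact this
          · intro h q b hq hge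
            by_cases hqp : q = (n : Int) - ((fuel : Int) + 1)
            · subst hqp
              have : b = 1 := by
                have := PySem.Dict.getD_of_get?_eq_some C (0 : Int) hq
                omega
              subst this
              unfold pvPairOk; rw [hfe, pvBitHigh fuel r hr]; rfl
            · have hge' : (n : Int) - fuel ≤ q := by
                rcases hQ q b hq with ⟨hq0, hqn, _⟩; omega
              have := h q b hq hge'
              unfold pvPairOk at *
              rw [pvBitLow _ _ r (hlowexp q b hq hge')]
              exact this
        simp only [pvAltEmit, hcon, if_true, hgd]
        rw [if_pos (by norm_num), ih (by omega)]
        rw [hrange, List.filter_append, List.filter_map, List.map_append, List.map_map]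
        rw [hlow]
        have : (List.filter ((fun r => pvLowOk n (fuel+1) C r) ∘ fun x => 2 ^ fuel + x) (List.range (2 ^ fuel))) = List.filter (fun r => pvLowOk n fuel C r) (List.range (2 ^ fuel)) := by
          apply List.filter_congr
          intro r hr
          exact hhigh r hr
        rw [this]
        simp only [List.map_nil, List.nil_append]
        apply List.map_congr_left
        intro r hr
        simp only [Function.comp]
        rw [pvShiftInt]
        push_cast
        ring
    · have hnone : C.get? ((n : Int) - ((fuel : Int) + 1)) = none := by
        rw [PySem.Dict.get?_eq_none_iff_contains]; simpa using hcon
      have hlow : ∀ r ∈ List.range (2 ^ fuel), pvLowOk n (fuel+1) C r = pvLowOk n fuel C r := by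
        intro r hr
        rw [Bool.eq_iff_iff, pvLowOk_iff n (fuel+1) C r hnd, pvLowOk_iff n fuel C r hnd]
        constructor
        · intro h q b hq hge; exact h q b hq (by omega)
        · intro h q b hq hge
          by_cases hqp : q = (n : Int) - ((fuel : Int) + 1)
          · subst hqp; rw [hnone] at hq; cases hq
          · exact h q b hq (by rcases hQ q b hq with ⟨hq0, hqn, _⟩; omega)
      have hhigh : ∀ r ∈ List.range (2 ^ fuel), pvLowOk n (fuel+1) C (2 ^ fuel + r) = pvLowOk n fuel C r := by
        intro r hr
        rw [List.mem_range] at hr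
        rw [Bool.eq_iff_iff, pvLowOk_iff n (fuel+1) C _ hnd, pvLowOk_iff n fuel C r hnd]
        constructor
        · intro h q b hq hge
          have := h q b hq (by omega)
          unfold pvPairOk at *
          rw [pvBitLow _ _ r (hlowexp q b hq hge)] at this
          exact this
        · intro h q b hq hge
          by_cases hqp : q = (n : Int) - ((fuel : Int) + 1)
          · subst hqp; rw [hnone] at hq; cases hq
          · have hge' : (n : Int) - fuel ≤ q := by
              rcases hQ q b hq with ⟨hq0, hqn, _⟩; omega
            have := h q b hq hge'
            unfold pvPairOk at *
            rw [pvBitLow _ _ r (hlowexp q b hq hge')]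
            exact this
      simp only [pvAltEmit, hcon]
      rw [if_neg (by simp), ih (by omega), ih (by omega)]
      rw [hrange, List.filter_append, List.filter_map, List.map_append, List.map_map]
      rw [List.filter_congr hlow]
      congr 1
      have : (List.filter ((fun r => pvLowOk n (fuel+1) C r) ∘ fun x => 2 ^ fuel + x) (List.range (2 ^ fuel))) = List.filter (fun r => pvLowOk n fuel C r) (List.range (2 ^ fuel)) := by
        apply List.filter_congr
        intro r hr
        exact hhigh r hr
      rw [this]
      apply List.map_congr_left
      intro r hr
      simp only [Function.comp]
      rw [pvShiftInt]
      push_cast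
      ring

-- the common normal form both programs are reduced to
def pvStepB (bm : List Int) (pos : PySem.Dict Int Int) (n : Nat) (iv : Int × Int) (r : Nat) : Bool :=
  decide (r / 2 ^ (n - 1 - (pos.getD iv.2 0).toNat) % 2
    = ((if PySem.List.pyGetD bm iv.1 0 ≠ 0 then (1 : Int) else 0)).toNat)

def pvRows (bm : List Int) (pos : PySem.Dict Int Int) (cv : List Int) (n : Nat) : List Int :=
  ((List.range (2 ^ n)).filter
      (fun r => (PySem.List.enumerate cv 0).all (fun iv => pvStepB bm pos n iv r))).map
    (fun r : Nat => (r : Int))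

lemma pvStepB_iff (bm : List Int) (pos : PySem.Dict Int Int) (n : Nat) (iv : Int × Int) (r : Nat) :
    pvStepB bm pos n iv r = true ↔ pvStep bm pos n iv r := by
  rw [pvStepB, pvStep, pvPairOk, decide_eq_true_eq]

lemma pvAllSteps_iff (bm : List Int) (pos : PySem.Dict Int Int) (n : Nat) (cv : List Int) (r : Nat) :
    ((PySem.List.enumerate cv 0).all (fun iv => pvStepB bm pos n iv r) = true)
      ↔ ∀ iv ∈ PySem.List.enumerate cv 0, pvStep bm pos n iv r := by
  rw [List.all_eq_true]
  constructor
  · intro h iv hiv; exact (pvStepB_iff bm pos n iv r).mp (h iv hiv)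
  · intro h iv hiv; exact (pvStepB_iff bm pos n iv r).mpr (h iv hiv)

lemma pvAltNormal (bm cv av : List Int) (hmem : ∀ v ∈ cv, v ∈ av) :
    find_corresponding_rows_alt bm cv av
      = pvRows bm ((PySem.List.enumerate av 0).foldl
          (fun d jv => if d.contains jv.2 then d else d.insert jv.2 jv.1) PySem.Dict.empty) cv av.length := by
  simp only [find_corresponding_rows_alt]
  set n := av.length with hn
  set posD := (PySem.List.enumerate av 0).foldl
      (fun d jv => if d.contains jv.2 then d else d.insert jv.2 jv.1) PySem.Dict.empty with hposD
  have hpos : ∀ v ∈ av, posD.getD v 0 = (av.idxOf v : Int) := by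
    intro v hv
    rw [hposD, pvPosFoldGetD]
    simp [PySem.Dict.contains_empty, hv]
  cases hbuild : pvAltBuild bm posD (PySem.List.enumerate cv 0) PySem.Dict.empty with
  | none =>
    show ([] : List Int) = pvRows bm posD cv n
    rw [pvRows]
    have hempty : ∀ r ∈ List.range (2 ^ n),
        ¬ ((PySem.List.enumerate cv 0).all (fun iv => pvStepB bm posD n iv r) = true) := by
      intro r _
      have hbn := pvBuildNone bm posD n (PySem.List.enumerate cv 0) PySem.Dict.empty
        (by intro p b h; rw [PySem.Dict.get?_empty] at h; cases h) hbuild r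
      rw [pvAllSteps_iff]
      intro hall
      exact hbn ⟨(by intro p b h; rw [PySem.Dict.get?_empty] at h; cases h), hall⟩
    rw [List.filter_eq_nil_iff.mpr (by intro r hr h; exact hempty r hr h)]
    rfl
  | some C =>
    show pvAltEmit C n n 0 = pvRows bm posD cv n
    have hQC : ∀ p b, C.get? p = some b → 0 ≤ p ∧ p < (n : Int) ∧ (b = 0 ∨ b = 1) := by
      refine pvBuildProps bm posD _ (PySem.List.enumerate cv 0) PySem.Dict.empty C hbuild ?_ ?_
      · intro p b h; rw [PySem.Dict.get?_empty] at h; cases h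
      · intro iv hiv
        obtain ⟨j, hj, rfl⟩ := (PySem.List.mem_enumerate_iff cv 0 iv).mp hiv
        have hv : cv[j] ∈ av := hmem _ (List.getElem_mem hj)
        have hidx : av.idxOf cv[j] < n := List.idxOf_lt_length_of_mem hv
        rw [hpos _ hv]
        refine ⟨⟨by positivity, by exact_mod_cast hidx, by norm_num⟩,
                ⟨by positivity, by exact_mod_cast hidx, by norm_num⟩⟩
    have hnd : C.keys.Nodup :=
      pvBuildNodup bm posD (PySem.List.enumerate cv 0) PySem.Dict.empty C hbuild
        PySem.Dict.nodup_keys_empty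
    rw [pvEmitEq C n hnd hQC n (le_refl n) 0, pvRows]
    have hfc : ∀ r ∈ List.range (2 ^ n),
        pvLowOk n n C r = (PySem.List.enumerate cv 0).all (fun iv => pvStepB bm posD n iv r) := by
      intro r _
      rw [Bool.eq_iff_iff, pvLowOk_iff n n C r hnd, pvAllSteps_iff]
      have hbs := pvBuildSome bm posD n (PySem.List.enumerate cv 0) PySem.Dict.empty C hbuild r
      have hme : pvMatches n PySem.Dict.empty r := by
        intro p b h; rw [PySem.Dict.get?_empty] at h; cases h
      constructor
      · intro h
        have hm : pvMatches n C r := by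
          intro p b hpb
          exact h p b hpb (by rcases hQC p b hpb with ⟨h0, _, _⟩; omega)
        exact ((hbs.mp hm).2)
      · intro h p b hpb _
        exact (hbs.mpr ⟨hme, h⟩) p b hpb
    rw [List.filter_congr hfc]
    apply List.map_congr_left
    intro r _
    simp

def pvABool (bm : List Int) (vt : PySem.Dict Int Int) (nn : Nat) (iv : Int × Int) (row : Int) : Bool :=
  (PySem.List.pyGetD bm iv.1 0 == 0) ==
    (PySem.Int.mod (PySem.Int.floordiv row ((2 : Int) ^ (((nn : Int) - 1 - vt.getD iv.2 0).toNat))) 2 == 0)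

lemma pvBridge (bm : List Int) (n : Nat) (vt pos : PySem.Dict Int Int) (i v : Int) (r : Nat)
    (idx : Nat) (hidx : idx < n)
    (hvt : vt.getD v 0 = (idx : Int)) (hpos : pos.getD v 0 = (idx : Int)) :
    (pvABool bm vt n (i, v) (r : Int) = true) ↔ (pvStepB bm pos n (i, v) r = true) := by
  rw [pvABool, pvStepB]
  simp only [hvt, hpos]
  have he : (((n : Int) - 1 - (idx : Int))).toNat = n - 1 - idx := by omega
  have he2 : ((idx : Int)).toNat = idx := by omega
  rw [he, he2]
  have hcast : ((2 : Int) ^ (n - 1 - idx)) = ((2 ^ (n - 1 - idx) : Nat) : Int) := by push_cast; ring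
  rw [hcast, PySem.Int.floordiv_natCast, show ((2:Int)) = ((2:Nat):Int) from by norm_num,
    PySem.Int.mod_natCast]
  have hlt : r / 2 ^ (n - 1 - idx) % 2 < 2 := Nat.mod_lt _ (by norm_num)
  by_cases hbm : PySem.List.pyGetD bm i 0 = 0
  · simp [hbm]
    rw [hcast, ← Int.natCast_ediv]
    omega
  · simp [hbm]
    rw [hcast, ← Int.natCast_ediv]
    omega

lemma pvANormal (bm cv av : List Int) (hlen : cv.length ≤ bm.length) (hmem : ∀ v ∈ cv, v ∈ av) :
    find_corresponding_rows bm cv av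
      = pvRows bm ((PySem.List.enumerate av 0).foldl
          (fun d jv => if d.contains jv.2 then d else d.insert jv.2 jv.1) PySem.Dict.empty) cv av.length := by
  set n := av.length with hn
  set posD := (PySem.List.enumerate av 0).foldl
      (fun d jv => if d.contains jv.2 then d else d.insert jv.2 jv.1) PySem.Dict.empty with hposD
  have hpos : ∀ v ∈ av, posD.getD v 0 = (av.idxOf v : Int) := by
    intro v hv
    rw [hposD, pvPosFoldGetD]
    simp [PySem.Dict.contains_empty, hv]
  by_cases hk : cv.length = 0
  · -- no common variables: all rows
    have hcv : cv = [] := List.length_eq_zero_iff.mp hk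
    subst hcv
    simp only [find_corresponding_rows, List.length_nil]
    rw [if_pos trivial, pvRows]
    have hall : ∀ r ∈ List.range (2 ^ n),
        ((PySem.List.enumerate ([] : List Int) 0).all (fun iv => pvStepB bm posD n iv r)) = true := by
      intro r _; simp [PySem.List.enumerate]
    rw [List.filter_eq_self.mpr hall, pvShiftInt n, PySem.List.pyRange_zero_nat]
  · -- at least one common variable
    simp only [find_corresponding_rows]
    rw [if_neg hk]
    set VT := cv.foldl (fun d v => d.insert v (((PySem.List.index? av v).getD 0 : Nat) : Int)) PySem.Dict.empty with hVT
    have hvt : ∀ v ∈ cv, VT.getD v 0 = (av.idxOf v : Int) := by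
      intro v hv
      rw [hVT, pvDictFoldFunGetD, if_pos hv, pvIndexGetD av v (hmem v hv)]
    have h0 : 0 < cv.length := Nat.pos_of_ne_zero hk
    have hbody : ∀ iv : Int × Int,
        (fun (s : PySem.Set Int) (row : Int) =>
          if (PySem.List.pyGetD bm iv.1 0 == 0 &&
              (PySem.Int.mod (PySem.Int.floordiv row ((2:Int) ^ (((av.length:Int) - 1 - VT.getD iv.2 0).toNat))) 2 == 0)) = true
          then PySem.Set.add s row
          else if (!(PySem.List.pyGetD bm iv.1 0 == 0) &&
              !(PySem.Int.mod (PySem.Int.floordiv row ((2:Int) ^ (((av.length:Int) - 1 - VT.getD iv.2 0).toNat))) 2 == 0)) = true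
          then PySem.Set.add s row
          else s)
        = fun s row => if pvABool bm VT av.length iv row then PySem.Set.add s row else s := by
      intro iv; funext s row
      rw [pvABool]
      cases h1 : (PySem.List.pyGetD bm iv.1 0 == 0) <;>
        cases h2 : (PySem.Int.mod (PySem.Int.floordiv row ((2:Int) ^ (((av.length:Int) - 1 - VT.getD iv.2 0).toNat))) 2 == 0) <;>
        simp_all
    have hRS : (PySem.List.enumerate cv 0).map (fun iv =>
          List.foldl (fun (s : PySem.Set Int) (row : Int) =>
            if (PySem.List.pyGetD bm iv.1 0 == 0 &&
                (PySem.Int.mod (PySem.Int.floordiv row ((2:Int) ^ (((av.length:Int) - 1 - VT.getD iv.2 0).toNat))) 2 == 0)) = true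
            then PySem.Set.add s row
            else if (!(PySem.List.pyGetD bm iv.1 0 == 0) &&
                !(PySem.Int.mod (PySem.Int.floordiv row ((2:Int) ^ (((av.length:Int) - 1 - VT.getD iv.2 0).toNat))) 2 == 0)) = true
            then PySem.Set.add s row
            else s) PySem.Set.empty (PySem.List.pyRange 0 ((2:Int) ^ av.length) 1))
        = (PySem.List.enumerate cv 0).map (fun iv =>
            (PySem.List.pyRange 0 ((2:Int) ^ av.length) 1).filter (pvABool bm VT av.length iv)) := by
      apply List.map_congr_left
      intro iv _
      rw [hbody iv]
      rw [pvSetFoldFilter _ _ _ (PySem.List.nodup_pyRange_one _ _)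
        (by intro x _ hx; simp [PySem.Set.empty] at hx)]
      simp [PySem.Set.empty]
    rw [hRS]
    set RS := (PySem.List.enumerate cv 0).map (fun iv =>
        (PySem.List.pyRange 0 ((2:Int) ^ av.length) 1).filter (pvABool bm VT av.length iv)) with hRSdef
    have hRSlen : RS.length = cv.length := by
      rw [hRSdef]; simp [PySem.List.length_enumerate]
    have hRSget : ∀ (j : Nat) (hj : j < cv.length),
        PySem.List.pyGetD RS (j : Int) PySem.Set.empty
          = (PySem.List.pyRange 0 ((2:Int) ^ av.length) 1).filter (pvABool bm VT av.length ((j:Int), cv[j]'hj)) := by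
      intro j hj
      rw [hRSdef, PySem.List.pyGetD_eq_getElem _ _ (by positivity)
        (by simp [PySem.List.length_enumerate]; exact_mod_cast hj)]
      simp [PySem.List.getElem_enumerate]
    have hfirst := hRSget 0 h0
    simp only [Nat.cast_zero] at hfirst
    rw [hfirst]
    have hfun2 : (fun (cr : PySem.Set Int) (row : Int) =>
          if pvMissingLoop RS row (PySem.List.pyRange 1 (RS.length : Int) 1) = true then cr
          else PySem.Set.add cr row)
        = fun cr row =>
            if (!pvMissingLoop RS row (PySem.List.pyRange 1 (RS.length : Int) 1)) = true
            then PySem.Set.add cr row else cr := by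
      funext cr row
      cases h : pvMissingLoop RS row (PySem.List.pyRange 1 (RS.length : Int) 1) <;> simp [h]
    rw [hfun2]
    rw [pvSetFoldFilter _ _ _ ((PySem.List.nodup_pyRange_one _ _).filter _)
      (by intro x _ hx; simp [PySem.Set.empty] at hx)]
    rw [show (PySem.Set.empty ++ List.filter
        (fun row => !pvMissingLoop RS row (PySem.List.pyRange 1 (RS.length : Int) 1))
        (List.filter (pvABool bm VT av.length (0, cv[0]'h0)) (PySem.List.pyRange 0 ((2:Int) ^ av.length) 1)))
      = List.filter (fun row => !pvMissingLoop RS row (PySem.List.pyRange 1 (RS.length : Int) 1))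
        (List.filter (pvABool bm VT av.length (0, cv[0]'h0)) (PySem.List.pyRange 0 ((2:Int) ^ av.length) 1))
      from List.nil_append _]
    rw [PySem.List.sorted_eq_of_perm_of_pairwise_lt _ _ _ (List.Perm.refl _)
      (List.Pairwise.sublist ((List.filter_sublist).trans (List.filter_sublist))
        (PySem.List.pairwise_lt_pyRange_one _ _))]
    rw [List.filter_filter]
    rw [show ((2:Int) ^ av.length) = ((2 ^ av.length : Nat) : Int) from by push_cast; ring]
    rw [PySem.List.pyRange_zero_nat, List.filter_map, pvRows]
    congr 1
    apply List.filter_congr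
    intro r hr
    have hrlt : r < 2 ^ av.length := List.mem_range.mp hr
    have hbr : ∀ (j : Nat) (hj : j < cv.length),
        ((pvABool bm VT av.length ((j:Int), cv[j]'hj) (r : Int) = true)
          ↔ (pvStepB bm posD av.length ((j:Int), cv[j]'hj) r = true)) := by
      intro j hj
      have hv : cv[j]'hj ∈ av := hmem _ (List.getElem_mem hj)
      exact pvBridge bm av.length VT posD (j:Int) _ r (av.idxOf (cv[j]'hj))
        (List.idxOf_lt_length_of_mem hv) (hvt _ (List.getElem_mem hj)) (hpos _ hv)
    have hcont : ∀ (j : Nat) (hj : j < cv.length),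
        (PySem.Set.contains ((PySem.List.pyRange 0 ((2:Int) ^ av.length) 1).filter
            (pvABool bm VT av.length ((j:Int), cv[j]'hj))) (r : Int)
          = pvABool bm VT av.length ((j:Int), cv[j]'hj) (r : Int)) := by
      intro j hj
      simp only [PySem.Set.contains]
      rw [List.contains_eq_mem]
      have hmemr : ((r:Nat) : Int) ∈ PySem.List.pyRange 0 ((2:Int) ^ av.length) 1 := by
        rw [PySem.List.mem_pyRange_one]
        exact ⟨by positivity, by exact_mod_cast hrlt⟩
      cases h : pvABool bm VT av.length ((j:Int), cv[j]'hj) (r : Int) <;>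
        simp [List.mem_filter, hmemr, h]
    have hmiss : ((!pvMissingLoop RS (r : Int) (PySem.List.pyRange 1 (RS.length : Int) 1)) = true)
        ↔ ∀ (j : Nat), 1 ≤ j → ∀ hj : j < cv.length,
            pvABool bm VT av.length ((j:Int), cv[j]) (r : Int) = true := by
      rw [pvMissingLoop_eq_any, Bool.not_eq_true', List.any_eq_false]
      constructor
      · intro h j hj1 hj
        have hmemi : ((j:Nat) : Int) ∈ PySem.List.pyRange 1 (RS.length : Int) 1 := by
          rw [PySem.List.mem_pyRange_one]
          exact ⟨by exact_mod_cast hj1, by rw [hRSlen]; exact_mod_cast hj⟩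
        have hh := h _ hmemi
        rw [hRSget j hj, hcont j hj] at hh
        simpa using hh
      · intro h i hi
        obtain ⟨hi1, hi2⟩ := PySem.List.mem_pyRange_one.mp hi
        rw [hRSlen] at hi2
        have hj : i.toNat < cv.length := by omega
        have hieq : ((i.toNat : Nat) : Int) = i := Int.toNat_of_nonneg (by omega)
        rw [← hieq, hRSget _ hj, hcont _ hj]
        have hh := h i.toNat (by omega) hj
        rw [hh]
        simp
    rw [Bool.eq_iff_iff, Function.comp_apply, Bool.and_eq_true, List.all_eq_true]
    constructor
    · rintro ⟨hq, hA0⟩ iv hiv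
      obtain ⟨j, hj, rfl⟩ := (PySem.List.mem_enumerate_iff cv 0 iv).mp hiv
      simp only [zero_add]
      rcases Nat.eq_zero_or_pos j with rfl | hj1
      · have hb0 := hbr 0 h0
        simp only [Nat.cast_zero] at hb0 ⊢
        exact hb0.mp hA0
      · exact (hbr j hj).mp ((hmiss.mp hq) j hj1 hj)
    · intro hall
      have hstep : ∀ (j : Nat), ∀ hj : j < cv.length,
          pvStepB bm posD av.length ((j:Int), cv[j]) r = true := by
        intro j hj
        have hin : ((0 + (j:Int)), cv[j]) ∈ PySem.List.enumerate cv 0 :=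
          (PySem.List.mem_enumerate_iff cv 0 _).mpr ⟨j, hj, rfl⟩
        have := hall _ hin
        simpa using this
      refine ⟨hmiss.mpr (fun j _ hj => (hbr j hj).mpr (hstep j hj)), ?_⟩
      have hb0 := hbr 0 h0
      have hs0 := hstep 0 h0
      simp only [Nat.cast_zero] at hb0 hs0
      exact hb0.mpr hs0

-- ===== VERDICT (by name: the statement is the Claim_ definition above) =====
theorem find_corresponding_rows_spec : Claim_equal_find_corresponding_rows := by
  intro bm cv av _dom hpre
  obtain ⟨hlen, hmem⟩ := hpre
  unfold Spec_find_corresponding_rows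
  rw [pvAltNormal bm cv av hmem, pvANormal bm cv av hlen hmem]
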